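-- pv_equiv track=rewrite | github.com/chumingi/Baekjoon | LECTURE/joonlab/sec02_구현/sec02_01_주어진_시나리오를_배열로_구현하기/j_02_01_02_1096_단일_항목_선호도_조사.py | solution
-- ===== SOURCE A (Python) =====
-- def solution(n, m, A, B):
--     # 배열 B에 저장된 m개의 질의를 순서대로 처리한다.
--     answer = []
--     for subject in B:
--         # subject이 '-'인 경우, 전체 학생 수 n을 answer에 넣는다.
--         if subject == "-":
--             answer.append(n)
--         # subject를 선택한 학생 수를 구하여 answer에 넣는다.
--         else:
--             cnt = 0
--             for a in A:
--                 if a == subject: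
--                     cnt += 1
--             answer.append(cnt)
--
--     return answer
-- ===== SOURCE B (Python) =====
-- def solution(n, m, A, B):
--     # Sort a copy of A once; answer each query with two hand-rolled binary
--     # searches (lower/upper bound), so the count of a subject is a boundary
--     # difference instead of a linear scan per query.
--     s = sorted(A)
--
--     def lower(x):  # first index whose element is >= x
--         lo, hi = 0, len(s)
--         while lo < hi:
--             mid = (lo + hi) // 2
--             if s[mid] < x:
--                 lo = mid + 1
--             else:
--                 hi = mid
--         return lo
--
--     def upper(x):  # first index whose element is > x
--         lo, hi = 0, len(s)
--         while lo < hi: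
--             mid = (lo + hi) // 2
--             if x < s[mid]:
--                 hi = mid
--             else:
--                 lo = mid + 1
--         return lo
--
--     return [n if q == "-" else upper(q) - lower(q) for q in B]
-- ===== Notes on version B (the rewrite author's own statement) =====
-- stated objective: faster
-- what changed: B sorts a copy of A once and answers each non-'-' query as the difference of two binary-search boundaries (upper bound minus lower bound) on the sorted list, instead of rescanning A linearly for every query.
import Mathlib
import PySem

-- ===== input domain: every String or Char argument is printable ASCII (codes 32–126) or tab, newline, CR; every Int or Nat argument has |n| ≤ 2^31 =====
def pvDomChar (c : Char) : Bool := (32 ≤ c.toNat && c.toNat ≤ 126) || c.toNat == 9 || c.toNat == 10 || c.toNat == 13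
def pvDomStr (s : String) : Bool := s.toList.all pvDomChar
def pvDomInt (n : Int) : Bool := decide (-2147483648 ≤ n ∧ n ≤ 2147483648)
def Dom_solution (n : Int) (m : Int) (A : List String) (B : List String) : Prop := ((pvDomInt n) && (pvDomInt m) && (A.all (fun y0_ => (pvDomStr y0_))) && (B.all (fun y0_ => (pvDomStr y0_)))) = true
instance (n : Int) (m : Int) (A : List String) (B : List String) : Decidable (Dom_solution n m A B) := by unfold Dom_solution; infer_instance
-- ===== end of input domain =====

-- B replaces A's per-query linear scan of A by one sort of A plus two binary-search
-- boundary queries per subject (upper bound minus lower bound); same return value.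

-- ===== PORT A =====
-- literal transliteration of A: for each query, rescan A counting matches
def solution (n : Int) (m : Int) (A : List String) (B : List String) : List Int :=
  B.foldl (fun answer subject =>
    if subject == "-" then answer ++ [n]
    else answer ++ [A.foldl (fun cnt a => if a == subject then cnt + 1 else cnt) (0 : Int)]) []

-- ===== PORT B =====
-- B's `lower`: the while loop becomes recursion on hi - lo.
-- Indexing via getD is exact here: every call keeps hi ≤ s.length, so mid is in range.
def pvLower (s : List String) (x : String) (lo hi : Nat) : Nat :=
  if lo < hi then
    let mid := (lo + hi) / 2
    if s.getD mid "" < x then pvLower s x (mid + 1) hi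
    else pvLower s x lo mid
  else lo
termination_by hi - lo
decreasing_by all_goals omega

-- B's `upper`
def pvUpper (s : List String) (x : String) (lo hi : Nat) : Nat :=
  if lo < hi then
    let mid := (lo + hi) / 2
    if x < s.getD mid "" then pvUpper s x lo mid
    else pvUpper s x (mid + 1) hi
  else lo
termination_by hi - lo
decreasing_by all_goals omega

-- B: sort a copy of A once, then each query is upper(q) - lower(q) on the sorted list
def solution_alt (n : Int) (m : Int) (A : List String) (B : List String) : List Int :=
  let s := PySem.List.sorted A (fun x => x) false
  B.map (fun q => if q == "-" then n
    else (pvUpper s q 0 s.length : Int) - (pvLower s q 0 s.length : Int))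

-- ===== PRECONDITION & SPEC =====
def Spec_solution (n : Int) (m : Int) (A : List String) (B : List String) (out : List Int) : Prop := out = solution_alt n m A B
instance (n : Int) (m : Int) (A : List String) (B : List String) (out : List Int) : Decidable (Spec_solution n m A B out) := by unfold Spec_solution; infer_instance

-- ===== CLAIM (what is proved, stated in full; the proofs are below) =====
def Claim_equal_solution : Prop := ∀ (n : Int) (m : Int) (A : List String) (B : List String), Dom_solution n m A B → Spec_solution n m A B (solution n m A B)

-- ===== LEMMAS AND PROOFS =====

-- the accumulator of A's outer loop factors out in front
theorem pv_foldl_acc_append (n : Int) (A : List String) (bs : List String) (acc : List Int) :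
    bs.foldl (fun answer subject =>
      if subject == "-" then answer ++ [n]
      else answer ++ [A.foldl (fun cnt a => if a == subject then cnt + 1 else cnt) (0 : Int)]) acc
    = acc ++ bs.foldl (fun answer subject =>
      if subject == "-" then answer ++ [n]
      else answer ++ [A.foldl (fun cnt a => if a == subject then cnt + 1 else cnt) (0 : Int)]) [] := by
  induction bs generalizing acc with
  | nil => simp
  | cons b bs ih =>
    simp only [List.foldl_cons]
    rw [ih, ih ((if b == "-" then _ else _))]
    split <;> simp

-- `lower` finds the boundary of the downward-closed index set {j | s[j] < x}
theorem pvLower_spec (s : List String) (x : String) (lo hi : Nat)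
    (hmono : ∀ i j (_ : i < s.length) (hj : j < s.length), i ≤ j → s[i] ≤ s[j])
    (hhi : hi ≤ s.length) (hlh : lo ≤ hi)
    (hbelow : ∀ j (hj : j < s.length), j < lo → s[j] < x)
    (habove : ∀ j (hj : j < s.length), hi ≤ j → ¬ s[j] < x) :
    pvLower s x lo hi ≤ s.length ∧
      (∀ j (hj : j < s.length), j < pvLower s x lo hi → s[j] < x) ∧
      (∀ j (hj : j < s.length), pvLower s x lo hi ≤ j → ¬ s[j] < x) := by
  by_cases h : lo < hi
  · have hmid : (lo + hi) / 2 < s.length := by omega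
    have hlomid : lo ≤ (lo + hi) / 2 := by omega
    by_cases hc : s[(lo + hi) / 2] < x
    · have hrec := pvLower_spec s x ((lo + hi) / 2 + 1) hi hmono hhi (by omega)
        (fun j hj hjlt => by
          by_cases hlt : j < lo
          · exact hbelow j hj hlt
          · exact lt_of_le_of_lt (hmono j _ hj hmid (by omega)) hc)
        habove
      rw [pvLower, if_pos h]
      simpa only [List.getD_eq_getElem s "" hmid, if_pos hc] using hrec
    · have hrec := pvLower_spec s x lo ((lo + hi) / 2) hmono (by omega) (by omega)
        hbelow
        (fun j hj hjge => fun hlt =>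
          hc (lt_of_le_of_lt (hmono _ j hmid hj hjge) hlt))
      rw [pvLower, if_pos h]
      simpa only [List.getD_eq_getElem s "" hmid, if_neg hc] using hrec
  · rw [pvLower, if_neg h]
    exact ⟨by omega, fun j hj hjlt => hbelow j hj (by omega),
      fun j hj hjge => habove j hj (by omega)⟩
termination_by hi - lo
decreasing_by all_goals omega

-- `upper` finds the boundary of the downward-closed index set {j | ¬ x < s[j]}
theorem pvUpper_spec (s : List String) (x : String) (lo hi : Nat)
    (hmono : ∀ i j (_ : i < s.length) (hj : j < s.length), i ≤ j → s[i] ≤ s[j])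
    (hhi : hi ≤ s.length) (hlh : lo ≤ hi)
    (hbelow : ∀ j (hj : j < s.length), j < lo → ¬ x < s[j])
    (habove : ∀ j (hj : j < s.length), hi ≤ j → x < s[j]) :
    pvUpper s x lo hi ≤ s.length ∧
      (∀ j (hj : j < s.length), j < pvUpper s x lo hi → ¬ x < s[j]) ∧
      (∀ j (hj : j < s.length), pvUpper s x lo hi ≤ j → x < s[j]) := by
  by_cases h : lo < hi
  · have hmid : (lo + hi) / 2 < s.length := by omega
    by_cases hc : x < s[(lo + hi) / 2]
    · have hrec := pvUpper_spec s x lo ((lo + hi) / 2) hmono (by omega) (by omega)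
        hbelow
        (fun j hj hjge => lt_of_lt_of_le hc (hmono _ j hmid hj hjge))
      rw [pvUpper, if_pos h]
      simpa only [List.getD_eq_getElem s "" hmid, if_pos hc] using hrec
    · have hrec := pvUpper_spec s x ((lo + hi) / 2 + 1) hi hmono hhi (by omega)
        (fun j hj hjlt => by
          by_cases hlt : j < lo
          · exact hbelow j hj hlt
          · exact fun hx => hc (lt_of_lt_of_le hx (hmono j _ hj hmid (by omega))))
        habove
      rw [pvUpper, if_pos h]
      simpa only [List.getD_eq_getElem s "" hmid, if_neg hc] using hrec
  · rw [pvUpper, if_neg h]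
    exact ⟨by omega, fun j hj hjlt => hbelow j hj (by omega),
      fun j hj hjge => habove j hj (by omega)⟩
termination_by hi - lo
decreasing_by all_goals omega

-- a predicate that holds exactly on the first r indices has countP = r
theorem pv_countP_of_boundary (s : List String) (p : String → Bool) (r : Nat)
    (hr : r ≤ s.length)
    (hchar : ∀ j (hj : j < s.length), p s[j] = true ↔ j < r) :
    s.countP p = r := by
  have hsplit : s = s.take r ++ s.drop r := (List.take_append_drop r s).symm
  rw [hsplit, List.countP_append]
  have h1 : (s.take r).countP p = (s.take r).length := by
    rw [List.countP_eq_length]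
    intro a ha
    rcases List.mem_iff_getElem.1 ha with ⟨i, hi, rfl⟩
    rw [List.getElem_take]
    exact (hchar i (by simp at hi; omega)).2 (by simp at hi; omega)
  have h2 : (s.drop r).countP p = 0 := by
    rw [List.countP_eq_zero]
    intro a ha
    rcases List.mem_iff_getElem.1 ha with ⟨i, hi, rfl⟩
    rw [List.getElem_drop]
    intro hp
    have := (hchar (r + i) (by simp at hi; omega)).1 hp
    omega
  rw [h1, h2, List.length_take]
  omega

-- counting ≤ x splits into counting < x and counting = x
theorem pv_countP_le_split (x : String) (l : List String) :
    l.countP (fun a => !decide (x < a)) = l.countP (fun a => decide (a < x)) + l.count x := by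
  induction l with
  | nil => simp
  | cons a l ih =>
    simp only [List.countP_cons, List.count_cons, ih]
    rcases lt_trichotomy a x with h | rfl | h
    · rw [if_pos (by simp [not_lt_of_gt h]), if_pos (by simp [h]),
        if_neg (by simp [ne_of_lt h])]
      omega
    · rw [if_pos (by simp), if_neg (by simp), if_pos (by simp)]
      omega
    · rw [if_neg (by simp [h]), if_neg (by simp [lt_asymm h]),
        if_neg (by simp [ne_of_gt h])]
      omega

-- per query: upper - lower on the sorted copy is A's count of the subject
theorem pv_query_eq (A : List String) (x : String) :
    ((pvUpper (PySem.List.sorted A (fun x => x) false) x 0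
        (PySem.List.sorted A (fun x => x) false).length : Int)
      - (pvLower (PySem.List.sorted A (fun x => x) false) x 0
        (PySem.List.sorted A (fun x => x) false).length : Int))
    = (A.count x : Int) := by
  set s := PySem.List.sorted A (fun x => x) false with hs
  have hpair : s.Pairwise (· ≤ ·) := by
    simpa using PySem.List.sorted_pairwise A (fun x => x)
  have hmono : ∀ i j (_ : i < s.length) (hj : j < s.length), i ≤ j → s[i] ≤ s[j] := by
    intro i j hi hj hij
    rcases Nat.eq_or_lt_of_le hij with rfl | hlt
    · exact le_refl _
    · exact (List.pairwise_iff_getElem.1 hpair) i j hi hj hlt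
  have hL := pvLower_spec s x 0 s.length hmono (le_refl _) (by omega)
    (fun j hj hjlt => absurd hjlt (by omega))
    (fun j hj hjge => absurd hj (by omega))
  have hU := pvUpper_spec s x 0 s.length hmono (le_refl _) (by omega)
    (fun j hj hjlt => absurd hjlt (by omega))
    (fun j hj hjge => absurd hj (by omega))
  have hLc : s.countP (fun a => decide (a < x)) = pvLower s x 0 s.length :=
    pv_countP_of_boundary s _ _ hL.1
      (fun j hj => by
        constructor
        · intro hp
          by_contra hge
          exact hL.2.2 j hj (by omega) (by simpa using hp)
        · intro hlt
          simpa using hL.2.1 j hj hlt)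
  have hUc : s.countP (fun a => !decide (x < a)) = pvUpper s x 0 s.length :=
    pv_countP_of_boundary s _ _ hU.1
      (fun j hj => by
        constructor
        · intro hp
          by_contra hge
          exact (by simpa using hp : ¬ x < s[j]) (hU.2.2 j hj (by omega))
        · intro hlt
          simpa using hU.2.1 j hj hlt)
  have hcount : s.count x = A.count x :=
    (PySem.List.sorted_perm A (fun x => x) false).count_eq x
  have := pv_countP_le_split x s
  omega

-- ===== VERDICT (by name: the statement is the Claim_ definition above) =====
theorem solution_spec : Claim_equal_solution := by
  intro n m A B h
  clear h
  unfold Spec_solution solution solution_alt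
  induction B with
  | nil => rfl
  | cons b bs ih =>
    simp only [List.foldl_cons, List.map_cons, List.nil_append]
    by_cases hb : b == "-"
    · rw [if_pos hb, if_pos hb, pv_foldl_acc_append, ih]; rfl
    · rw [if_neg hb, if_neg hb, pv_foldl_acc_append, ih,
        PySem.List.foldl_count_if (fun a => a == b) A 0, ← List.count_eq_countP,
        ← pv_query_eq A b]
      simp
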